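-- pv_equiv track=rewrite | github.com/laurinealdairy/comp202-w2020 | ass3 dicts_utils.py | create_scrabble_dict
-- ===== SOURCE A (Python) =====
-- def word_list(character, length, string_list):
--     """
--     (str, int, list) --> list
--
--     takes in character representing first letter,
--     length representing length of string, and list of
--     avaiable words, returns list of string of length
--     length starting with character
--
--     >>> b = ['aa', 'qi', 'za', 'cat', 'can', 'cow', 'dog', 'dad', 'hippo', 'umami', 'uncle']
--     >>> word_list('u', 5, b)
--     ['umami', 'uncle']
--     >>> word_list('c', 3, b)
--     ['cat', 'can', 'cow']
--     >>> word_list('q', 4, b)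
--     []
--     """
--     #create empty list
--     new_list = []
--     #iterate through elements of list
--     for word in string_list:
--         if (word[0] == character) and (len(word) == length):
--             new_list.append(word)
--     return new_list
--
-- def create_scrabble_dict(string_list):
--     """
--     (list) --> 2D dict
--
--     takes in list of strings and returns dict mapping
--     ints to dicts of words of that length
--
--     >>> b = ['aa', 'qi', 'za', 'cat', 'can', 'cow', 'dog', 'dad', 'hippo', 'umami', 'uncle']
--     >>> d = create_scrabble_dict(b)
--     >>> d == {2: {'a': ['aa'], 'q': ['qi'], 'z': ['za']}, 3: {'c': ['cat', 'can', 'cow'], 'd': ['dog', 'dad']}, 5: {'h': ['hippo'], 'u': ['umami', 'uncle']}}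
--     True
--     >>> b = ['aftosas', 'haws', 'hear', 'jots', 'ki', 'kicked', 'nuncle', 'pearl', 'pi', 'sister', 'toph']
--     >>> d = create_scrabble_dict(b)
--     >>> d == {7: {'a': ['aftosas']}, 4: {'h': ['haws', 'hear'], 'j': ['jots'], 't': ['toph']}, 2: {'k': ['ki'], 'p': ['pi']}, 6: {'k': ['kicked'], 'n': ['nuncle'], 's': ['sister']}, 5: {'p': ['pearl']}}
--     True
--     >>> b = ['haws', 'hear', 'jots', 'ki', 'pi', 'toph']
--     >>> d = create_scrabble_dict(b)
--     >>> d == {4: {'h': ['haws', 'hear'], 'j': ['jots'], 't': ['toph']}, 2: {'k': ['ki'], 'p': ['pi']}}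
--     True
--     """
--     #create empty dict
--     scrabble_dict = {}
--     #iterate through elements of list to create dict
--     for word in string_list:
--         #create empty dicts
--         scrabble_dict[len(word)] = {}
--     #now we have {2: {}, 3: {}} etc.
--     #iterate through dict
--     for key in scrabble_dict:
--         #iterate through list
--         for word in string_list:
--             w = word[0]
--             #store list of key length words starting w/ w
--             w_list = word_list(w, key, string_list)
--             #check list is not empty
--             if len(w_list) != 0:
--                 scrabble_dict[key][w] = w_list
--     return scrabble_dict
-- ===== SOURCE B (Python) =====
-- def create_scrabble_dict(string_list):
--     # One pass builds a (length, first-letter) -> words index plus the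
--     # first-occurrence orders of lengths and first letters; the nested dict
--     # is then assembled directly from the index, with no repeated scans.
--     groups = {}
--     lengths = {}
--     letters = {}
--     for word in string_list:
--         n = len(word)
--         c = word[0]
--         lengths[n] = None
--         letters[c] = None
--         groups.setdefault((n, c), []).append(word)
--     return {n: {c: groups[(n, c)] for c in letters if (n, c) in groups}
--             for n in lengths}
-- ===== Notes on version B (the rewrite author's own statement) =====
-- stated objective: faster
-- what changed: Replaces A's rescan-per-(length,word) construction (word_list refilters the whole list for every word under every length key) by one pass that builds a (length, first-letter) -> words index plus first-occurrence orders, from which the nested dict is assembled directly.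
import Mathlib
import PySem

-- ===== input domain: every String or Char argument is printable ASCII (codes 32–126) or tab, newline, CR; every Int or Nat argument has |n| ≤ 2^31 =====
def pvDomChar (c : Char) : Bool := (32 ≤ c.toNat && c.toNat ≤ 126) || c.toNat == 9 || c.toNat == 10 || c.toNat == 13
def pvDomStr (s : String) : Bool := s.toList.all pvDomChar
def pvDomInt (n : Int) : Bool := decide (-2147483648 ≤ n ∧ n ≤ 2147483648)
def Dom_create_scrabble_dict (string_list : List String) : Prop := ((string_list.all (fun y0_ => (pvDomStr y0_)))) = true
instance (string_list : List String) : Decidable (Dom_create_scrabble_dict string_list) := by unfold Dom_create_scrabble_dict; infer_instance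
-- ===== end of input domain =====

-- B replaces A's per-(length,word) rescans of the whole list by one grouping pass
-- over a (length, first-letter) index, for an asymptotically faster build.

-- ===== PORT A =====
-- word[0] as a 1-character string; exact for nonempty strings (Pre_ excludes "",
-- on which Python raises IndexError).
def pvHead1 (w : String) : String := String.ofList (w.toList.take 1)

def pv_word_list (character : String) (length : Int) (string_list : List String) : List String :=
  string_list.foldl (fun new_list word =>
    if pvHead1 word = character ∧ PySem.Str.len word = length then new_list ++ [word]
    else new_list) []

def create_scrabble_dict (string_list : List String) : List (Int × List (String × List String)) :=
  -- first loop: scrabble_dict[len(word)] = {}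
  let d0 : PySem.Dict Int (PySem.Dict String (List String)) :=
    string_list.foldl (fun d word => d.insert (PySem.Str.len word) PySem.Dict.empty) PySem.Dict.empty
  -- second loop: for key in scrabble_dict: for word in string_list: …
  let d1 : PySem.Dict Int (PySem.Dict String (List String)) :=
    d0.keys.foldl (fun d key =>
      string_list.foldl (fun d word =>
        let w := pvHead1 word
        let w_list := pv_word_list w key string_list
        if PySem.List.len w_list ≠ 0 then
          -- scrabble_dict[key][w] = w_list  (key is always present, default unused)
          d.modify key PySem.Dict.empty (fun inner => inner.insert w w_list)
        else d) d) d0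
  d1.items.map (fun p => (p.1, p.2.items))

-- ===== PORT B =====
def create_scrabble_dict_alt (string_list : List String) : List (Int × List (String × List String)) :=
  -- one pass: groups.setdefault((n, c), []).append(word); lengths[n] = None; letters[c] = None
  let st :
      PySem.Dict (Int × String) (List String) × PySem.Dict Int Unit × PySem.Dict String Unit :=
    string_list.foldl (fun st word =>
      (st.1.modify (PySem.Str.len word, pvHead1 word) [] (fun l => l ++ [word]),
       st.2.1.insert (PySem.Str.len word) (),
       st.2.2.insert (pvHead1 word) ()))
      (PySem.Dict.empty, PySem.Dict.empty, PySem.Dict.empty)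
  let groups := st.1
  let lengths := st.2.1
  let letters := st.2.2
  lengths.keys.map (fun n =>
    (n, (letters.keys.filter (fun c => groups.contains (n, c))).map
          (fun c => (c, groups.getD (n, c) []))))

-- ===== PRECONDITION & SPEC =====
-- Pre_ excludes lists containing the empty string, on which Python's word[0] raises IndexError.
def Pre_create_scrabble_dict (string_list : List String) : Prop := "" ∉ string_list
instance (string_list : List String) : Decidable (Pre_create_scrabble_dict string_list) := by
  unfold Pre_create_scrabble_dict; infer_instance

def pvWitness_create_scrabble_dict : List String := ["aa", "qi", "cat", "can", "dog"]

def Spec_create_scrabble_dict (string_list : List String) (out : List (Int × List (String × List String))) : Prop := out = create_scrabble_dict_alt string_list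
instance (string_list : List String) (out : List (Int × List (String × List String))) : Decidable (Spec_create_scrabble_dict string_list out) := by unfold Spec_create_scrabble_dict; infer_instance

-- ===== CLAIM (what is proved, stated in full; the proofs are below) =====
def Claim_equal_create_scrabble_dict : Prop := ∀ (string_list : List String), Dom_create_scrabble_dict string_list → Pre_create_scrabble_dict string_list → Spec_create_scrabble_dict string_list (create_scrabble_dict string_list)

-- ===== LEMMAS AND PROOFS =====

-- the common normal form both ports are reduced to
def pvNF (xs : List String) : List (Int × List (String × List String)) :=
  (PySem.Set.ofList (xs.map PySem.Str.len)).map (fun n =>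
    (n, ((PySem.Set.ofList (xs.map pvHead1)).filter
            (fun c => decide (pv_word_list c n xs ≠ []))).map
          (fun c => (c, pv_word_list c n xs))))

lemma pv_update_nil {α : Type} [BEq α] (l : List α) :
    PySem.Set.update ([] : PySem.Set α) l = PySem.Set.ofList l := by
  simp [PySem.Set.update, PySem.Set.ofList_eq_foldl]

lemma pv_word_list_eq_filter (c : String) (n : Int) (xs : List String) :
    pv_word_list c n xs
      = xs.filter (fun w => decide (pvHead1 w = c ∧ PySem.Str.len w = n)) := by
  unfold pv_word_list
  rw [show (fun (nl : List String) w => if pvHead1 w = c ∧ PySem.Str.len w = n then nl ++ [w] else nl)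
        = fun nl w => if (decide (pvHead1 w = c ∧ PySem.Str.len w = n)) = true then nl ++ [id w] else nl from by
      funext nl w; simp]
  rw [PySem.List.foldl_append_if]
  simp

lemma pv_word_list_ne_nil_iff (c : String) (n : Int) (xs : List String) :
    pv_word_list c n xs ≠ [] ↔ ∃ w ∈ xs, pvHead1 w = c ∧ PySem.Str.len w = n := by
  rw [pv_word_list_eq_filter, Ne, List.filter_eq_nil_iff]
  push Not
  simp

-- PySem.Set.ofList commutes with filter
lemma pv_ofList_filter {α : Type} [BEq α] [LawfulBEq α] (q : α → Bool) (ys : List α) :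
    PySem.Set.ofList (ys.filter q) = (PySem.Set.ofList ys).filter q := by
  simp only [PySem.Set.ofList_eq_foldl]
  induction ys using List.reverseRecOn with
  | nil => simp
  | append_singleton ys y ih =>
    rw [List.filter_append, List.foldl_append]
    by_cases hq : q y = true <;>
      by_cases hm : y ∈ List.foldl PySem.Set.add [] ys <;>
        simp [hq, hm, ih, PySem.Set.add, PySem.Set.contains, List.mem_filter,
          List.filter_append]

-- lookup through an insert loop whose value depends only on the key
lemma pv_getD_foldl_insert_keyfun {κ ν : Type} [BEq κ] [LawfulBEq κ] [DecidableEq κ]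
    {β : Type} (l : List β) (key : β → κ) (f : κ → ν)
    (d : PySem.Dict κ ν) (c : κ) (dflt : ν) :
    (l.foldl (fun d b => d.insert (key b) (f (key b))) d).getD c dflt
      = if c ∈ l.map key then f c else d.getD c dflt := by
  induction l generalizing d with
  | nil => simp
  | cons b l ih =>
    rw [List.foldl_cons, ih]
    by_cases h : c ∈ l.map key
    · simp [h]
    · by_cases hb : c = key b <;> simp [h, hb, PySem.Dict.getD_insert]

-- items of an insert loop whose value depends only on the key
lemma pv_items_foldl_insert_keyfun {κ ν : Type} [BEq κ] [LawfulBEq κ] [DecidableEq κ]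
    {β : Type} (l : List β) (key : β → κ) (f : κ → ν) :
    ((l.foldl (fun d b => d.insert (key b) (f (key b))) PySem.Dict.empty).items)
      = (PySem.Set.ofList (l.map key)).map (fun c => (c, f c)) := by
  match l with
  | [] => simp [PySem.Set.ofList, PySem.Dict.empty]
  | b :: l' =>
    have hnd := PySem.Dict.nodup_keys_foldl_insert_key (b :: l') key (fun _ x => f (key x))
      PySem.Dict.empty PySem.Dict.nodup_keys_empty
    rw [PySem.Dict.items_eq_map_keys _ hnd (f (key b))]
    rw [PySem.Dict.keys_foldl_insert_key (b :: l') key (fun _ x => f (key x)) PySem.Dict.empty]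
    rw [PySem.Dict.keys_empty, pv_update_nil]
    apply List.map_congr_left
    intro c hc
    rw [pv_getD_foldl_insert_keyfun]
    rw [if_pos (by rwa [PySem.Set.mem_ofList] at hc)]

-- ==== A-side: the second loop, one outer iteration at a fixed key n ====

-- what A's iteration at key n does to the inner dict stored at n
def pvInnerApply (n : Int) (xs l : List String) (inner : PySem.Dict String (List String)) :
    PySem.Dict String (List String) :=
  l.foldl (fun inner word =>
    if PySem.List.len (pv_word_list (pvHead1 word) n xs) ≠ 0 then
      inner.insert (pvHead1 word) (pv_word_list (pvHead1 word) n xs)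
    else inner) inner

lemma pvAStep_getD (n : Int) (xs l : List String)
    (d : PySem.Dict Int (PySem.Dict String (List String))) (m : Int) :
    (l.foldl (fun d word =>
        if PySem.List.len (pv_word_list (pvHead1 word) n xs) ≠ 0 then
          d.modify n PySem.Dict.empty
            (fun inner => inner.insert (pvHead1 word) (pv_word_list (pvHead1 word) n xs))
        else d) d).getD m PySem.Dict.empty
      = if m = n then pvInnerApply n xs l (d.getD n PySem.Dict.empty)
        else d.getD m PySem.Dict.empty := by
  induction l generalizing d with
  | nil => by_cases h : m = n <;> simp [pvInnerApply, h]
  | cons w l ih =>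
    rw [List.foldl_cons]
    by_cases hc : pv_word_list (pvHead1 w) n xs = []
    · have hlen : ¬ PySem.List.len (pv_word_list (pvHead1 w) n xs) ≠ 0 := by
        simp [PySem.List.len_eq, hc]
      rw [if_neg hlen, ih]
      by_cases hm : m = n <;> simp [hm, pvInnerApply, hc]
    · have hlen : PySem.List.len (pv_word_list (pvHead1 w) n xs) ≠ 0 := by
        simp [PySem.List.len_eq, hc]
      rw [if_pos hlen, ih]
      by_cases hm : m = n <;>
        simp [hm, pvInnerApply, PySem.Dict.getD_modify, hc]

lemma pvAStep_keys (n : Int) (xs l : List String)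
    (d : PySem.Dict Int (PySem.Dict String (List String)))
    (h : d.contains n = true) :
    (l.foldl (fun d word =>
        if PySem.List.len (pv_word_list (pvHead1 word) n xs) ≠ 0 then
          d.modify n PySem.Dict.empty
            (fun inner => inner.insert (pvHead1 word) (pv_word_list (pvHead1 word) n xs))
        else d) d).keys = d.keys := by
  induction l generalizing d with
  | nil => rfl
  | cons w l ih =>
    rw [List.foldl_cons]
    by_cases hc : PySem.List.len (pv_word_list (pvHead1 w) n xs) ≠ 0
    · rw [if_pos hc]
      have h' : (d.modify n PySem.Dict.empty
          (fun inner => inner.insert (pvHead1 w) (pv_word_list (pvHead1 w) n xs))).contains n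
            = true := by
        rw [PySem.Dict.contains_modify]; simp
      rw [ih _ h', PySem.Dict.keys_modify, PySem.Dict.keys_insert_of_contains _ _ h]
    · rw [if_neg hc, ih _ h]

-- A's whole second loop, folded over a Nodup list of keys already present in d
lemma pvOuter (xs : List String) (ks : List Int)
    (d : PySem.Dict Int (PySem.Dict String (List String)))
    (hnd : ks.Nodup) (hc : ∀ k ∈ ks, d.contains k = true) :
    (ks.foldl (fun d key =>
        xs.foldl (fun d word =>
          if PySem.List.len (pv_word_list (pvHead1 word) key xs) ≠ 0 then
            d.modify key PySem.Dict.empty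
              (fun inner => inner.insert (pvHead1 word) (pv_word_list (pvHead1 word) key xs))
          else d) d) d).keys = d.keys ∧
    ∀ m, (ks.foldl (fun d key =>
        xs.foldl (fun d word =>
          if PySem.List.len (pv_word_list (pvHead1 word) key xs) ≠ 0 then
            d.modify key PySem.Dict.empty
              (fun inner => inner.insert (pvHead1 word) (pv_word_list (pvHead1 word) key xs))
          else d) d) d).getD m PySem.Dict.empty
      = if m ∈ ks then pvInnerApply m xs xs (d.getD m PySem.Dict.empty)
        else d.getD m PySem.Dict.empty := by
  induction ks generalizing d with
  | nil => exact ⟨rfl, fun m => by simp⟩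
  | cons k ks ih =>
    obtain ⟨hk, hks⟩ := List.nodup_cons.mp hnd
    have hck : d.contains k = true := hc k List.mem_cons_self
    set d' := xs.foldl (fun d word =>
        if PySem.List.len (pv_word_list (pvHead1 word) k xs) ≠ 0 then
          d.modify k PySem.Dict.empty
            (fun inner => inner.insert (pvHead1 word) (pv_word_list (pvHead1 word) k xs))
        else d) d with hd'
    have hkeys1 : d'.keys = d.keys := pvAStep_keys k xs xs d hck
    have hc' : ∀ j ∈ ks, d'.contains j = true := by
      intro j hj
      rw [PySem.Dict.contains_iff_mem_keys, hkeys1, ← PySem.Dict.contains_iff_mem_keys]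
      exact hc j (List.mem_cons_of_mem _ hj)
    obtain ⟨ihk, ihg⟩ := ih d' hks hc'
    refine ⟨by rw [List.foldl_cons, ← hd', ihk, hkeys1], ?_⟩
    intro m
    rw [List.foldl_cons, ← hd', ihg m]
    by_cases hm : m ∈ ks
    · have hmk : m ≠ k := fun h => hk (h ▸ hm)
      rw [if_pos hm, if_pos (List.mem_cons_of_mem _ hm)]
      rw [hd', pvAStep_getD, if_neg hmk]
    · rw [if_neg hm, hd', pvAStep_getD]
      by_cases hmk : m = k
      · rw [if_pos hmk, if_pos (hmk ▸ List.mem_cons_self), hmk]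
      · rw [if_neg hmk, if_neg (by simp [hmk, hm])]

-- A's inner dict at key n, as items
lemma pvInnerApply_items (n : Int) (xs : List String) :
    (pvInnerApply n xs xs PySem.Dict.empty).items
      = ((PySem.Set.ofList (xs.map pvHead1)).filter
            (fun c => decide (pv_word_list c n xs ≠ []))).map
          (fun c => (c, pv_word_list c n xs)) := by
  unfold pvInnerApply
  rw [show (fun (inner : PySem.Dict String (List String)) word =>
        if PySem.List.len (pv_word_list (pvHead1 word) n xs) ≠ 0 then
          inner.insert (pvHead1 word) (pv_word_list (pvHead1 word) n xs)
        else inner)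
      = fun inner word =>
        if (decide (pv_word_list (pvHead1 word) n xs ≠ [])) = true then
          inner.insert (pvHead1 word) (pv_word_list (pvHead1 word) n xs)
        else inner from by
    funext inner w
    by_cases h : pv_word_list (pvHead1 w) n xs = [] <;> simp [h, PySem.List.len_eq]]
  rw [← List.foldl_filter]
  rw [pv_items_foldl_insert_keyfun (xs.filter fun w => decide (pv_word_list (pvHead1 w) n xs ≠ []))
      pvHead1 (fun c => pv_word_list c n xs)]
  rw [show (fun w => decide (pv_word_list (pvHead1 w) n xs ≠ []))
      = ((fun c => decide (pv_word_list c n xs ≠ [])) ∘ pvHead1) from rfl]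
  rw [← List.filter_map, pv_ofList_filter]

lemma pvA_eq_NF (xs : List String) : create_scrabble_dict xs = pvNF xs := by
  show ((xs.foldl (fun d word => d.insert (PySem.Str.len word) PySem.Dict.empty)
          PySem.Dict.empty).keys.foldl (fun d key =>
        xs.foldl (fun d word =>
          if PySem.List.len (pv_word_list (pvHead1 word) key xs) ≠ 0 then
            d.modify key PySem.Dict.empty
              (fun inner => inner.insert (pvHead1 word) (pv_word_list (pvHead1 word) key xs))
          else d) d)
        (xs.foldl (fun d word => d.insert (PySem.Str.len word) PySem.Dict.empty)
          PySem.Dict.empty)).items.map (fun p => (p.1, p.2.items)) = pvNF xs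
  set d0 := xs.foldl (fun d word => d.insert (PySem.Str.len word)
      (PySem.Dict.empty : PySem.Dict String (List String))) PySem.Dict.empty with hd0
  have h0k : d0.keys = PySem.Set.ofList (xs.map PySem.Str.len) := by
    rw [hd0, PySem.Dict.keys_foldl_insert_key xs PySem.Str.len (fun _ _ => PySem.Dict.empty),
        PySem.Dict.keys_empty, pv_update_nil]
  have h0nd : d0.keys.Nodup := by
    rw [hd0]
    exact PySem.Dict.nodup_keys_foldl_insert_key xs PySem.Str.len (fun _ _ => PySem.Dict.empty)
      PySem.Dict.empty PySem.Dict.nodup_keys_empty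
  have h0g : ∀ m, d0.getD m PySem.Dict.empty = PySem.Dict.empty := by
    intro m
    rw [hd0, pv_getD_foldl_insert_keyfun xs PySem.Str.len (fun _ => PySem.Dict.empty)]
    split <;> simp
  have hcont : ∀ k ∈ d0.keys, d0.contains k = true := by
    intro k hk; rwa [PySem.Dict.contains_iff_mem_keys]
  obtain ⟨hk1, hg1⟩ := pvOuter xs d0.keys d0 h0nd hcont
  rw [PySem.Dict.items_eq_map_keys _ (by rw [hk1]; exact h0nd) PySem.Dict.empty, hk1, List.map_map]
  unfold pvNF
  rw [← h0k]
  apply List.map_congr_left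
  intro m hm
  simp only [Function.comp]
  rw [hg1 m, if_pos hm, h0g m, pvInnerApply_items]

-- ==== B-side ====

lemma pvB_eq_NF (xs : List String) : create_scrabble_dict_alt xs = pvNF xs := by
  simp only [create_scrabble_dict_alt]
  rw [PySem.List.foldl_prod_mk
      (f := fun (d : PySem.Dict (Int × String) (List String)) (w : String) =>
        d.modify (PySem.Str.len w, pvHead1 w) [] (fun l => l ++ [w]))
      (g := fun (pr : PySem.Dict Int Unit × PySem.Dict String Unit) (w : String) =>
        (pr.1.insert (PySem.Str.len w) (), pr.2.insert (pvHead1 w) ()))]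
  rw [PySem.List.foldl_prod_mk
      (f := fun (d : PySem.Dict Int Unit) (w : String) => d.insert (PySem.Str.len w) ())
      (g := fun (d : PySem.Dict String Unit) (w : String) => d.insert (pvHead1 w) ())]
  dsimp only
  have hlenk : (xs.foldl (fun (d : PySem.Dict Int Unit) w => d.insert (PySem.Str.len w) ())
      PySem.Dict.empty).keys = PySem.Set.ofList (xs.map PySem.Str.len) := by
    rw [PySem.Dict.keys_foldl_insert_key xs PySem.Str.len (fun _ _ => ()),
        PySem.Dict.keys_empty, pv_update_nil]
  have hletk : (xs.foldl (fun (d : PySem.Dict String Unit) w => d.insert (pvHead1 w) ())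
      PySem.Dict.empty).keys = PySem.Set.ofList (xs.map pvHead1) := by
    rw [PySem.Dict.keys_foldl_insert_key xs pvHead1 (fun _ _ => ()),
        PySem.Dict.keys_empty, pv_update_nil]
  have hgetD : ∀ (n : Int) (c : String),
      (xs.foldl (fun (d : PySem.Dict (Int × String) (List String)) w =>
          d.modify (PySem.Str.len w, pvHead1 w) [] (fun l => l ++ [w]))
        PySem.Dict.empty).getD (n, c) [] = pv_word_list c n xs := by
    intro n c
    have hml : xs.foldl (fun (d : PySem.Dict (Int × String) (List String)) w =>
          d.modify (PySem.Str.len w, pvHead1 w) [] (fun l => l ++ [w])) PySem.Dict.empty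
        = (xs.map (fun w => ((PySem.Str.len w, pvHead1 w), w))).foldl
            (fun d p => d.modify p.1 [] (fun l => l ++ [p.2])) PySem.Dict.empty :=
      (List.foldl_map (f := fun w => ((PySem.Str.len w, pvHead1 w), w))
        (g := fun (d : PySem.Dict (Int × String) (List String)) p =>
          d.modify p.1 [] (fun l => l ++ [p.2])) (l := xs)
        (init := PySem.Dict.empty)).symm
    rw [hml, PySem.Dict.getD_foldl_modify_append, PySem.Dict.getD_empty, List.nil_append,
        List.filter_map, List.map_map, pv_word_list_eq_filter]
    rw [show ((fun (x : (Int × String) × String) => x.2) ∘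
          fun w => ((PySem.Str.len w, pvHead1 w), w)) = id from rfl, List.map_id]
    apply List.filter_congr
    intro w _
    simp only [Function.comp]
    rw [Bool.eq_iff_iff]
    simp [Prod.ext_iff]
    tauto
  have hcont : ∀ (n : Int) (c : String),
      (xs.foldl (fun (d : PySem.Dict (Int × String) (List String)) w =>
          d.modify (PySem.Str.len w, pvHead1 w) [] (fun l => l ++ [w]))
        PySem.Dict.empty).contains (n, c) = decide (pv_word_list c n xs ≠ []) := by
    intro n c
    rw [PySem.Dict.contains_eq_decide_mem_keys,
        PySem.Dict.keys_foldl_modify_key xs (fun w => (PySem.Str.len w, pvHead1 w)) []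
          (fun _ w => fun l => l ++ [w]),
        PySem.Dict.keys_empty, pv_update_nil]
    rw [Bool.eq_iff_iff]
    simp only [decide_eq_true_eq, PySem.Set.mem_ofList, List.mem_map,
      pv_word_list_ne_nil_iff, Prod.mk.injEq]
    constructor
    · rintro ⟨w, hw, h1, h2⟩; exact ⟨w, hw, h2, h1⟩
    · rintro ⟨w, hw, h1, h2⟩; exact ⟨w, hw, h2, h1⟩
  rw [hlenk, hletk]
  unfold pvNF
  apply List.map_congr_left
  intro n _
  rw [show (fun c => (xs.foldl (fun (st : PySem.Dict (Int × String) (List String)) word =>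
        st.modify (PySem.Str.len word, pvHead1 word) [] fun l => l ++ [word])
        PySem.Dict.empty).contains (n, c)) = fun c => decide (pv_word_list c n xs ≠ []) from
    funext fun c => hcont n c]
  refine congrArg _ (List.map_congr_left fun c _ => ?_)
  rw [hgetD n c]

-- ===== VERDICT (by name: the statement is the Claim_ definition above) =====
theorem create_scrabble_dict_spec : Claim_equal_create_scrabble_dict := by
  intro xs _ _
  unfold Spec_create_scrabble_dict
  rw [pvA_eq_NF, pvB_eq_NF]
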